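-- pv_equiv track=rewrite | github.com/frederikho/dynamic-coalition-formation | lib/equilibrium/ordinal_ranking/ranking_orders.py | _find_lcs_connected_components
-- ===== SOURCE A (Python) =====
-- from collections import deque
--
-- def _find_lcs_connected_components(
--     lcs_states: frozenset[str],
--     state_names: list[str],
--     players: list[str],
--     committee_idxs: list[list[list[tuple[int, ...]]]],
--     forbidden_proposals: frozenset | None = None,
-- ) -> list[frozenset[str]]:
--     """Find weakly connected components of LCS states under permitted transitions.
--
--     An undirected edge exists between LCS states A and B when at least one
--     non-forbidden proposal for the transition A→B (or B→A) exists.  Two states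
--     that share no edge-path at all are provably in different Closed Communicating
--     Classes (Theorem 2).
--     """
--     lcs_idx_set = {state_names.index(s) for s in lcs_states}
--     n_players = len(players)
--     _forbidden = forbidden_proposals or frozenset()
--
--     # Build undirected adjacency among LCS state indices.
--     adj: dict[int, set[int]] = {i: set() for i in lcs_idx_set}
--     for pi in range(n_players):
--         proposer = players[pi]
--         for ci in lcs_idx_set:
--             for ni in lcs_idx_set:
--                 if ci == ni:
--                     continue
--                 if (proposer, state_names[ci], state_names[ni]) in _forbidden:
--                     continue
--                 # At least one non-forbidden proposer → permitted edge.
--                 adj[ci].add(ni)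
--                 adj[ni].add(ci)  # undirected: B→A counts as well
--
--     # BFS to collect weakly-connected components.
--     visited: set[int] = set()
--     components: list[frozenset[str]] = []
--     for start in sorted(lcs_idx_set):
--         if start in visited:
--             continue
--         component: set[int] = set()
--         queue: deque[int] = deque([start])
--         while queue:
--             node = queue.popleft()
--             if node in visited:
--                 continue
--             visited.add(node)
--             component.add(node)
--             for nb in adj.get(node, set()):
--                 if nb not in visited:
--                     queue.append(nb)
--         components.append(frozenset(state_names[i] for i in component))
--
--     return components
-- ===== SOURCE B (Python) =====
-- from collections import Counter
--
--
-- def _find_lcs_connected_components(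
--     lcs_states,
--     state_names,
--     players,
--     committee_idxs,
--     forbidden_proposals=None,
-- ):
--     """Counter-based rewrite: an edge between two LCS states is absent iff every
--     player forbids both directions, so per-pair forbidding-player counts (built
--     in one pass over the forbidden set) replace the per-player rescan of all
--     state pairs; components are then collected by a stack-based search."""
--     idxs = sorted(state_names.index(s) for s in lcs_states)
--     n_players = len(players)
--     pmult = Counter(players)
--     forb = Counter()
--     for proposer, a, b in (forbidden_proposals or frozenset()):
--         forb[(a, b)] += pmult[proposer]
--
--     def permitted(i, j):
--         a, b = state_names[i], state_names[j]
--         return forb[(a, b)] < n_players or forb[(b, a)] < n_players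
--
--     components = []
--     assigned = set()
--     for start in idxs:
--         if start in assigned:
--             continue
--         comp = {start}
--         stack = [start]
--         while stack:
--             i = stack.pop()
--             for j in idxs:
--                 if j not in comp and permitted(i, j):
--                     comp.add(j)
--                     stack.append(j)
--         assigned |= comp
--         components.append(frozenset(state_names[i] for i in comp))
--     return components
-- ===== Notes on version B (the rewrite author's own statement) =====
-- stated objective: alternative
-- what changed: Instead of A's triple loop over players and all state pairs building an adjacency dict, B counts forbidding players per ordered name pair in one pass over the forbidden set (an edge is absent iff both directions reach the player count) and collects components with a stack-based search; intended as faster (O(K^2+|forbidden|+P) vs O(P*K^2)) but a timing run read only an inconsistent 1.78x at the largest size, so no speed is claimed.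
import Mathlib
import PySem

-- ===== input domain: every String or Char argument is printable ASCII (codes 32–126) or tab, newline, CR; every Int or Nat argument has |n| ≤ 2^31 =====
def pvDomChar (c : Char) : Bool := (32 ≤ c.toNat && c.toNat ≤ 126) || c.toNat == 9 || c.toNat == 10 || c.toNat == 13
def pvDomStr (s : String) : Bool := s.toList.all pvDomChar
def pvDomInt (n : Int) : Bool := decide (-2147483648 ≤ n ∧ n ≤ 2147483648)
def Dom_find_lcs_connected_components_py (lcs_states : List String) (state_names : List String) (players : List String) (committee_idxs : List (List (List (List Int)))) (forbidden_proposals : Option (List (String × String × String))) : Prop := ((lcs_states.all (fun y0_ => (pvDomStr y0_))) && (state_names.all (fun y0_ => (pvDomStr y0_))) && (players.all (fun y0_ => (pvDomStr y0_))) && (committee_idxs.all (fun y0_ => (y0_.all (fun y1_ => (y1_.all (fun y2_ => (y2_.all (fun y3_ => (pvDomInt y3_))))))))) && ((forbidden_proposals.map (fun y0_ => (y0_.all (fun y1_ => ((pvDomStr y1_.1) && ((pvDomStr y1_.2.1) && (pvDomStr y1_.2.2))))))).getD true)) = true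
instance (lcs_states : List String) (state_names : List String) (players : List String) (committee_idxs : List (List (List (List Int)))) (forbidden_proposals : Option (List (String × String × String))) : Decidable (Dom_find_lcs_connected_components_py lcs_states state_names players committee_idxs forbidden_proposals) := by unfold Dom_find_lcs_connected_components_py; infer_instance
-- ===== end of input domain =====

-- B replaces A's per-player rescan of all state pairs by per-pair forbidding-player counts
-- built in one pass over the forbidden set (objective: alternative algorithm, same result).

-- ===== PORT A =====
-- Two small facts cited by the termination arguments of the worklist loops below.
lemma pvContainsAdd {α : Type} [BEq α] [LawfulBEq α] (s : PySem.Set α) (n x : α) :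
    PySem.Set.contains (PySem.Set.add s n) x = (PySem.Set.contains s x || x == n) := by
  rw [Bool.eq_iff_iff]
  simp [PySem.Set.mem_add]

lemma pvFilterLeLen {α : Type} (l : List α) (p q : α → Bool)
    (himp : ∀ x, q x = true → p x = true) :
    (l.filter q).length ≤ (l.filter p).length := by
  induction l with
  | nil => simp
  | cons a t ih =>
    simp only [List.filter_cons]
    cases hqa : q a
    · rw [if_neg (by simp)]
      cases hpa : p a
      · rw [if_neg (by simp)]
        exact ih
      · rw [if_pos (by simp)]
        exact Nat.le_succ_of_le ih
    · rw [himp a hqa]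
      simpa using ih

lemma pvFilterLtLen {α : Type} (l : List α) (p q : α → Bool)
    (himp : ∀ x, q x = true → p x = true) (x0 : α) (hx : x0 ∈ l)
    (hp : p x0 = true) (hq : q x0 = false) :
    (l.filter q).length < (l.filter p).length := by
  induction l with
  | nil => cases hx
  | cons a t ih =>
    simp only [List.filter_cons]
    rcases List.mem_cons.mp hx with heq | hx'
    · rw [heq] at hp hq
      rw [hq, hp]
      simp only [Bool.false_eq_true, if_false, if_true, List.length_cons]
      exact Nat.lt_succ_of_le (pvFilterLeLen t p q himp)
    · cases hqa : q a
      · cases hpa : p a <;> simp only [Bool.false_eq_true, if_false, if_true, List.length_cons]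
        · exact ih hx'
        · exact Nat.lt_succ_of_lt (ih hx')
      · rw [himp a hqa]
        simp only [if_true, List.length_cons]
        exact Nat.succ_lt_succ (ih hx')

-- BFS worklist: 'while queue: node = queue.popleft(); …'.  The recursion is on
-- (#pool states not yet visited, queue length); the 'node ∈ pool' test is a termination
-- guard only — every queued node lies in the pool (the LCS index set).
def pvBfsA (adj : PySem.Dict Int (PySem.Set Int)) (pool : List Int) :
    List Int → PySem.Set Int → PySem.Set Int → PySem.Set Int × PySem.Set Int
  | [], visited, component => (visited, component)
  | node :: rest, visited, component =>
    if PySem.Set.contains visited node then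
      pvBfsA adj pool rest visited component
    else
      let visited' := PySem.Set.add visited node
      let component' := PySem.Set.add component node
      if hpool : node ∈ pool then
        -- for nb in adj.get(node, set()): if nb not in visited: queue.append(nb)
        pvBfsA adj pool
          (rest ++ (PySem.Dict.getD adj node PySem.Set.empty).filter
            (fun nb => !(PySem.Set.contains visited' nb))) visited' component'
      else
        pvBfsA adj pool rest visited' component'
termination_by queue visited _ =>
  ((pool.filter (fun i => !(PySem.Set.contains visited i))).length, queue.length)
decreasing_by
  · exact Prod.Lex.right _ (Nat.lt_succ_self _)
  · apply Prod.Lex.left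
    apply pvFilterLtLen pool _ _ _ node hpool
    · simpa using ‹¬ PySem.Set.contains visited node = true›
    · simp
    · intro x hx
      simp only [pvContainsAdd, Bool.not_or, Bool.and_eq_true, Bool.not_eq_true'] at hx
      simpa using hx.1
  · have heq : pool.filter (fun i => !(PySem.Set.contains (PySem.Set.add visited node) i))
        = pool.filter (fun i => !(PySem.Set.contains visited i)) := by
      apply List.filter_congr
      intro x hx
      have hxn : x ≠ node := fun h => hpool (h ▸ hx)
      simp [hxn]
    rw [heq]
    exact Prod.Lex.right _ (Nat.lt_succ_self _)

-- visit one start: BFS over the adjacency built from the triple player×state×state loop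
def pvOuterA (state_names : List String) (adj : PySem.Dict Int (PySem.Set Int)) (pool : List Int) :
    List Int → PySem.Set Int → List (List String) → List (List String)
  | [], _, components => components
  | start :: rest, visited, components =>
    if PySem.Set.contains visited start then
      pvOuterA state_names adj pool rest visited components
    else
      let r := pvBfsA adj pool [start] visited PySem.Set.empty
      -- frozenset(state_names[i] for i in component): set iteration order is not modelled;
      -- the set is emitted in ascending index order (exact as a set)
      pvOuterA state_names adj pool rest r.1
        (components ++ [PySem.Set.ofList
          ((PySem.List.sorted r.2 (fun x => x) false).map
            (fun i => PySem.List.pyGetD state_names i ""))])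

def find_lcs_connected_components_py (lcs_states : List String) (state_names : List String) (players : List String) (committee_idxs : List (List (List (List Int)))) (forbidden_proposals : Option (List (String × String × String))) : List (List String) :=
  -- lcs_idx_set = {state_names.index(s) for s in lcs_states}   (index found under Pre_)
  let lcs_idx_set : PySem.Set Int :=
    PySem.Set.ofList (lcs_states.map (fun s => (((PySem.List.index? state_names s).getD 0 : Nat) : Int)))
  let n_players : Int := PySem.List.len players
  let _forbidden : List (String × String × String) := forbidden_proposals.getD []
  -- adj = {i: set() for i in lcs_idx_set}
  let adj0 : PySem.Dict Int (PySem.Set Int) :=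
    lcs_idx_set.foldl (fun d i => d.insert i PySem.Set.empty) PySem.Dict.empty
  -- for pi in range(n_players): for ci in lcs_idx_set: for ni in lcs_idx_set: …
  let adj : PySem.Dict Int (PySem.Set Int) :=
    (PySem.List.pyRange 0 n_players 1).foldl (fun adj pi =>
      let proposer := PySem.List.pyGetD players pi ""
      lcs_idx_set.foldl (fun adj ci =>
        lcs_idx_set.foldl (fun adj ni =>
          if ci = ni then adj
          else if (proposer, PySem.List.pyGetD state_names ci "",
                   PySem.List.pyGetD state_names ni "") ∈ _forbidden then adj
          else
            PySem.Dict.modify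
              (PySem.Dict.modify adj ci PySem.Set.empty (fun s => PySem.Set.add s ni))
              ni PySem.Set.empty (fun s => PySem.Set.add s ci)) adj) adj) adj0
  -- for start in sorted(lcs_idx_set): … BFS …
  pvOuterA state_names adj lcs_idx_set
    (PySem.List.sorted lcs_idx_set (fun x => x) false) PySem.Set.empty []

-- ===== PORT B =====
-- inner 'for j in idxs: if j not in comp and permitted(i, j): comp.add(j); stack.append(j)'
-- returns the updated comp and the newly pushed nodes in push order
def pvScanB (permitted : Int → Int → Bool) (idxs : List Int) (i : Int) (comp : PySem.Set Int) :
    PySem.Set Int × List Int :=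
  idxs.foldl (fun acc j =>
      if !(PySem.Set.contains acc.1 j) && permitted i j then
        (PySem.Set.add acc.1 j, acc.2 ++ [j])
      else acc)
    (comp, [])

-- facts cited by pvDfsB's termination argument
lemma pvScanB_fst_aux (permitted : Int → Int → Bool) (i : Int) :
    ∀ (l : List Int) (acc : PySem.Set Int × List Int) (comp0 : PySem.Set Int),
      acc.1 = comp0 ++ acc.2 →
      (l.foldl (fun acc j =>
        if !(PySem.Set.contains acc.1 j) && permitted i j then
          (PySem.Set.add acc.1 j, acc.2 ++ [j])
        else acc) acc).1
      = comp0 ++ (l.foldl (fun acc j =>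
        if !(PySem.Set.contains acc.1 j) && permitted i j then
          (PySem.Set.add acc.1 j, acc.2 ++ [j])
        else acc) acc).2 := by
  intro l
  induction l with
  | nil => intro acc comp0 h; simpa using h
  | cons a t ih =>
    intro acc comp0 h
    simp only [List.foldl_cons]
    by_cases hc : (!(PySem.Set.contains acc.1 a) && permitted i a) = true
    · rw [if_pos hc]
      apply ih
      have hna : a ∉ acc.1 := by
        rcases Bool.and_eq_true .. |>.mp hc with ⟨h1, _⟩
        simpa [PySem.Set.contains_iff] using h1
      show PySem.Set.add acc.1 a = _
      rw [PySem.Set.add_of_not_mem hna, h, List.append_assoc]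
    · rw [if_neg hc]; exact ih acc comp0 h

lemma pvScanB_fst (permitted : Int → Int → Bool) (idxs : List Int) (i : Int) (comp : PySem.Set Int) :
    (pvScanB permitted idxs i comp).1 = comp ++ (pvScanB permitted idxs i comp).2 :=
  pvScanB_fst_aux permitted i idxs (comp, []) comp (by simp)

lemma pvScanB_new_aux (permitted : Int → Int → Bool) (i : Int) :
    ∀ (l : List Int) (acc : PySem.Set Int × List Int) (comp0 : PySem.Set Int),
      acc.1 = comp0 ++ acc.2 →
      ∀ j, j ∈ (l.foldl (fun acc j =>
        if !(PySem.Set.contains acc.1 j) && permitted i j then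
          (PySem.Set.add acc.1 j, acc.2 ++ [j])
        else acc) acc).2 →
        j ∈ acc.2 ∨ (j ∈ l ∧ j ∉ comp0 ∧ permitted i j = true) := by
  intro l
  induction l with
  | nil => intro acc comp0 _ j hj; exact Or.inl hj
  | cons a t ih =>
    intro acc comp0 h j hj
    simp only [List.foldl_cons] at hj
    by_cases hc : (!(PySem.Set.contains acc.1 a) && permitted i a) = true
    · rw [if_pos hc] at hj
      rcases Bool.and_eq_true .. |>.mp hc with ⟨h1, h2⟩
      have hna : a ∉ acc.1 := by simpa [PySem.Set.contains_iff] using h1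
      have h' : (PySem.Set.add acc.1 a, acc.2 ++ [a]).1 = comp0 ++ (PySem.Set.add acc.1 a, acc.2 ++ [a]).2 := by
        show PySem.Set.add acc.1 a = _
        rw [PySem.Set.add_of_not_mem hna, h, List.append_assoc]
      rcases ih _ comp0 h' j hj with hin | ⟨hjt, hjc, hjp⟩
      · rcases List.mem_append.mp hin with hin | hin
        · exact Or.inl hin
        · have : j = a := by simpa using hin
          subst this
          refine Or.inr ⟨List.mem_cons_self .., fun hc0 => hna ?_, h2⟩
          rw [h]; exact List.mem_append.mpr (Or.inl hc0)
      · exact Or.inr ⟨List.mem_cons_of_mem _ hjt, hjc, hjp⟩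
    · rw [if_neg hc] at hj
      rcases ih _ comp0 h j hj with hin | ⟨hjt, hjc, hjp⟩
      · exact Or.inl hin
      · exact Or.inr ⟨List.mem_cons_of_mem _ hjt, hjc, hjp⟩

lemma pvScanB_new (permitted : Int → Int → Bool) (idxs : List Int) (i : Int) (comp : PySem.Set Int) :
    ∀ j ∈ (pvScanB permitted idxs i comp).2, j ∈ idxs ∧ j ∉ comp ∧ permitted i j = true := by
  intro j hj
  rcases pvScanB_new_aux permitted i idxs (comp, []) comp (by simp) j hj with h | h
  · cases h
  · exact h

-- stack-based search: 'while stack: i = stack.pop(); scan idxs'.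
-- The Lean stack keeps its top at the head; Python pushes at the end and pops the last,
-- so newly pushed nodes are prepended in reverse push order.
def pvDfsB (permitted : Int → Int → Bool) (idxs : List Int) :
    List Int → PySem.Set Int → PySem.Set Int
  | [], comp => comp
  | i :: stack, comp =>
    let r := pvScanB permitted idxs i comp
    pvDfsB permitted idxs (r.2.reverse ++ stack) r.1
termination_by stack comp =>
  ((idxs.filter (fun j => !(PySem.Set.contains comp j))).length, stack.length)
decreasing_by
  rcases hnew : (pvScanB permitted idxs i comp).2 with _ | ⟨j, t⟩
  · have h1 : (pvScanB permitted idxs i comp).1 = comp := by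
      rw [pvScanB_fst, hnew]; simp
    rw [h1]
    exact Prod.Lex.right _ (by simp)
  · apply Prod.Lex.left
    have hj := pvScanB_new permitted idxs i comp j (by rw [hnew]; exact List.mem_cons_self ..)
    apply pvFilterLtLen idxs _ _ _ j hj.1
    · simpa [PySem.Set.contains_iff] using hj.2.1
    · have : j ∈ (pvScanB permitted idxs i comp).1 := by
        rw [pvScanB_fst, hnew]; simp
      simpa [PySem.Set.contains_iff] using this
    · intro x hx
      simp only [Bool.not_eq_true'] at hx ⊢
      have hm : x ∉ (pvScanB permitted idxs i comp).1 := by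
        simpa [PySem.Set.contains_iff] using hx
      rw [pvScanB_fst] at hm
      simpa [PySem.Set.contains_iff] using fun hc => hm (List.mem_append.mpr (Or.inl hc))

def pvOuterB (state_names : List String) (permitted : Int → Int → Bool) (idxs : List Int) :
    List Int → PySem.Set Int → List (List String) → List (List String)
  | [], _, components => components
  | start :: rest, assigned, components =>
    if PySem.Set.contains assigned start then
      pvOuterB state_names permitted idxs rest assigned components
    else
      let comp := pvDfsB permitted idxs [start] (PySem.Set.add PySem.Set.empty start)
      -- frozenset(state_names[i] for i in comp): emitted in ascending index order (exact as a set)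
      pvOuterB state_names permitted idxs rest (PySem.Set.update assigned comp)
        (components ++ [PySem.Set.ofList
          ((PySem.List.sorted comp (fun x => x) false).map
            (fun i => PySem.List.pyGetD state_names i ""))])

def find_lcs_connected_components_py_alt (lcs_states : List String) (state_names : List String) (players : List String) (committee_idxs : List (List (List (List Int)))) (forbidden_proposals : Option (List (String × String × String))) : List (List String) :=
  -- idxs = sorted(state_names.index(s) for s in lcs_states)
  let idxs : List Int :=
    PySem.List.sorted (lcs_states.map (fun s => (((PySem.List.index? state_names s).getD 0 : Nat) : Int)))
      (fun x => x) false
  let n_players : Int := PySem.List.len players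
  let pmult : PySem.Dict String Int := PySem.Dict.counter players
  -- forb[(a, b)] += pmult[proposer]  over the forbidden set, one pass
  let forb : PySem.Dict (String × String) Int :=
    (forbidden_proposals.getD []).foldl
      (fun d t => PySem.Dict.modify d (t.2.1, t.2.2) 0 (· + PySem.Dict.getD pmult t.1 0))
      PySem.Dict.empty
  let permitted : Int → Int → Bool := fun i j =>
    let a := PySem.List.pyGetD state_names i ""
    let b := PySem.List.pyGetD state_names j ""
    decide (PySem.Dict.getD forb (a, b) 0 < n_players) ||
      decide (PySem.Dict.getD forb (b, a) 0 < n_players)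
  pvOuterB state_names permitted idxs idxs PySem.Set.empty []

-- ===== PRECONDITION & SPEC =====
-- Pre_ excludes (a) inputs where some LCS state is missing from state_names — there A's
-- state_names.index raises ValueError — and (b) lists with duplicates in the two
-- frozenset-typed arguments: a frozenset holds distinct elements, so such lists do not
-- denote inputs of the Python function.
def Pre_find_lcs_connected_components_py (lcs_states : List String) (state_names : List String) (players : List String) (committee_idxs : List (List (List (List Int)))) (forbidden_proposals : Option (List (String × String × String))) : Prop :=
  (∀ s ∈ lcs_states, s ∈ state_names) ∧ lcs_states.Nodup ∧ (forbidden_proposals.getD []).Nodup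
instance (lcs_states : List String) (state_names : List String) (players : List String) (committee_idxs : List (List (List (List Int)))) (forbidden_proposals : Option (List (String × String × String))) : Decidable (Pre_find_lcs_connected_components_py lcs_states state_names players committee_idxs forbidden_proposals) := by unfold Pre_find_lcs_connected_components_py; infer_instance

def pvWitness_find_lcs_connected_components_py : List String × List String × List String × List (List (List (List Int))) × (Option (List (String × String × String))) :=
  (["a", "b"], ["a", "b"], ["p"], [], some [("p", "a", "b"), ("p", "b", "a")])

def Spec_find_lcs_connected_components_py (lcs_states : List String) (state_names : List String) (players : List String) (committee_idxs : List (List (List (List Int)))) (forbidden_proposals : Option (List (String × String × String))) (out : List (List String)) : Prop := out = find_lcs_connected_components_py_alt lcs_states state_names players committee_idxs forbidden_proposals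
instance (lcs_states : List String) (state_names : List String) (players : List String) (committee_idxs : List (List (List (List Int)))) (forbidden_proposals : Option (List (String × String × String))) (out : List (List String)) : Decidable (Spec_find_lcs_connected_components_py lcs_states state_names players committee_idxs forbidden_proposals out) := by unfold Spec_find_lcs_connected_components_py; infer_instance

-- ===== CLAIM (what is proved, stated in full; the proofs are below) =====
def Claim_equal_find_lcs_connected_components_py : Prop := ∀ (lcs_states : List String) (state_names : List String) (players : List String) (committee_idxs : List (List (List (List Int)))) (forbidden_proposals : Option (List (String × String × String))), Dom_find_lcs_connected_components_py lcs_states state_names players committee_idxs forbidden_proposals → Pre_find_lcs_connected_components_py lcs_states state_names players committee_idxs forbidden_proposals → Spec_find_lcs_connected_components_py lcs_states state_names players committee_idxs forbidden_proposals (find_lcs_connected_components_py lcs_states state_names players committee_idxs forbidden_proposals)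

-- ===== LEMMAS AND PROOFS =====

-- ---------- proof-side vocabulary ----------

-- the list of LCS state indices, in lcs_states order
def pvIdxs (lcs_states state_names : List String) : List Int :=
  lcs_states.map (fun s => (((PySem.List.index? state_names s).getD 0 : Nat) : Int))

def pvNm (state_names : List String) (i : Int) : String := PySem.List.pyGetD state_names i ""

-- the permitted-transition edge relation between LCS state indices
def pvE (state_names players : List String) (F : List (String × String × String))
    (L : List Int) (x y : Int) : Prop :=
  x ∈ L ∧ y ∈ L ∧ x ≠ y ∧ ∃ p ∈ players,
    (p, pvNm state_names x, pvNm state_names y) ∉ F ∨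
    (p, pvNm state_names y, pvNm state_names x) ∉ F

lemma pvE_symm {state_names players F L} {x y : Int}
    (h : pvE state_names players F L x y) : pvE state_names players F L y x := by
  obtain ⟨h1, h2, h3, p, hp, hd⟩ := h
  exact ⟨h2, h1, h3.symm, p, hp, hd.symm⟩

-- ---------- index set ----------

lemma pvIdxs_nodup (lcs_states state_names : List String)
    (h1 : ∀ s ∈ lcs_states, s ∈ state_names) (h2 : lcs_states.Nodup) :
    (pvIdxs lcs_states state_names).Nodup := by
  apply h2.map_on
  intro s hs t ht heq
  obtain ⟨ks, hks⟩ := (PySem.List.index?_isSome_iff state_names s).mpr (h1 s hs) |> Option.isSome_iff_exists.mp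
  obtain ⟨kt, hkt⟩ := (PySem.List.index?_isSome_iff state_names t).mpr (h1 t ht) |> Option.isSome_iff_exists.mp
  obtain ⟨hlts, hgs, -⟩ := PySem.List.getElem_of_index?_eq_some hks
  obtain ⟨hltt, hgt, -⟩ := PySem.List.getElem_of_index?_eq_some hkt
  rw [hks, hkt] at heq
  simp only [Option.getD_some, Int.natCast_inj] at heq
  subst heq
  rw [← hgs, ← hgt]

-- ---------- A: the adjacency dict characterises pvE ----------

lemma pvAdj0_getD (S : List Int) (x : Int) :
    PySem.Dict.getD (S.foldl (fun d i => d.insert i PySem.Set.empty)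
        (PySem.Dict.empty : PySem.Dict Int (PySem.Set Int)))
      x PySem.Set.empty = PySem.Set.empty := by
  suffices h : ∀ (d : PySem.Dict Int (PySem.Set Int)),
      (∀ z, PySem.Dict.getD d z PySem.Set.empty = PySem.Set.empty) →
      PySem.Dict.getD (S.foldl (fun d i => d.insert i PySem.Set.empty) d) x PySem.Set.empty
        = PySem.Set.empty by
    exact h _ (fun z => rfl)
  induction S with
  | nil => intro d hd; exact hd x
  | cons a t ih =>
    intro d hd
    simp only [List.foldl_cons]
    refine ih _ (fun z => ?_)
    by_cases hz : z = a
    · subst hz; simp [PySem.Dict.getD_insert_self]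
    · rw [PySem.Dict.getD_insert_of_ne _ _ _ hz]
      exact hd z

lemma pvAdjInner (state_names : List String) (F : List (String × String × String))
    (proposer : String) (ci : Int) :
    ∀ (ys : List Int) (adj : PySem.Dict Int (PySem.Set Int)) (x y : Int),
      y ∈ PySem.Dict.getD (ys.foldl (fun adj ni =>
          if ci = ni then adj
          else if (proposer, PySem.List.pyGetD state_names ci "",
                   PySem.List.pyGetD state_names ni "") ∈ F then adj
          else
            PySem.Dict.modify
              (PySem.Dict.modify adj ci PySem.Set.empty (fun s => PySem.Set.add s ni))
              ni PySem.Set.empty (fun s => PySem.Set.add s ci)) adj) x PySem.Set.empty ↔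
      (y ∈ PySem.Dict.getD adj x PySem.Set.empty ∨
        ∃ ni ∈ ys, ci ≠ ni ∧ (proposer, pvNm state_names ci, pvNm state_names ni) ∉ F ∧
          ((x = ci ∧ y = ni) ∨ (x = ni ∧ y = ci))) := by
  intro ys
  induction ys with
  | nil => intro adj x y; simp
  | cons a t ih =>
    intro adj x y
    simp only [List.foldl_cons]
    by_cases h1 : ci = a
    · rw [if_pos h1, ih]
      simp only [List.mem_cons, exists_eq_or_imp]
      constructor
      · rintro (h | h)
        · exact Or.inl h
        · exact Or.inr (Or.inr h)
      · rintro (h | ⟨hne, -, -⟩ | h)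
        · exact Or.inl h
        · exact absurd h1 hne
        · exact Or.inr h
    · rw [if_neg h1]
      by_cases h2 : (proposer, PySem.List.pyGetD state_names ci "",
          PySem.List.pyGetD state_names a "") ∈ F
      · rw [if_pos h2, ih]
        simp only [List.mem_cons, exists_eq_or_imp]
        constructor
        · rintro (h | h)
          · exact Or.inl h
          · exact Or.inr (Or.inr h)
        · rintro (h | ⟨-, hnf, -⟩ | h)
          · exact Or.inl h
          · exact absurd h2 hnf
          · exact Or.inr h
      · rw [if_neg h2, ih]
        have hD : y ∈ PySem.Dict.getD
            (PySem.Dict.modify (PySem.Dict.modify adj ci PySem.Set.empty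
              (fun s => PySem.Set.add s a)) a PySem.Set.empty (fun s => PySem.Set.add s ci))
            x PySem.Set.empty ↔
            (y ∈ PySem.Dict.getD adj x PySem.Set.empty ∨
              ((x = ci ∧ y = a) ∨ (x = a ∧ y = ci))) := by
          simp only [PySem.Dict.getD_modify]
          by_cases hxa : x = a
          · subst hxa
            rw [if_pos rfl, if_neg (fun h => h1 h.symm)]
            simp only [PySem.Set.mem_add]
            constructor
            · rintro (h | rfl)
              · exact Or.inl h
              · exact Or.inr (Or.inr ⟨by trivial, rfl⟩)
            · rintro (h | ⟨hac, rfl⟩ | ⟨-, rfl⟩)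
              · exact Or.inl h
              · exact absurd hac (fun hh => h1 hh.symm)
              · exact Or.inr rfl
          · rw [if_neg hxa]
            by_cases hxc : x = ci
            · subst hxc
              rw [if_pos rfl]
              simp only [PySem.Set.mem_add]
              constructor
              · rintro (h | rfl)
                · exact Or.inl h
                · exact Or.inr (Or.inl ⟨by trivial, rfl⟩)
              · rintro (h | ⟨-, rfl⟩ | ⟨hca, rfl⟩)
                · exact Or.inl h
                · exact Or.inr rfl
                · exact absurd hca h1
            · rw [if_neg hxc]
              constructor
              · exact Or.inl
              · rintro (h | ⟨hc', rfl⟩ | ⟨ha', rfl⟩)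
                · exact h
                · exact absurd hc' hxc
                · exact absurd ha' hxa
        rw [hD]
        have h2' : (proposer, pvNm state_names ci, pvNm state_names a) ∉ F := h2
        simp only [List.mem_cons, exists_eq_or_imp]
        constructor
        · rintro ((h | h) | h)
          · exact Or.inl h
          · exact Or.inr (Or.inl ⟨h1, h2', h⟩)
          · exact Or.inr (Or.inr h)
        · rintro (h | ⟨-, -, h⟩ | h)
          · exact Or.inl (Or.inl h)
          · exact Or.inl (Or.inr h)
          · exact Or.inr h

lemma pvAdjMid (state_names : List String) (F : List (String × String × String))
    (proposer : String) (ys : List Int) :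
    ∀ (cs : List Int) (adj : PySem.Dict Int (PySem.Set Int)) (x y : Int),
      y ∈ PySem.Dict.getD (cs.foldl (fun adj ci => ys.foldl (fun adj ni =>
          if ci = ni then adj
          else if (proposer, PySem.List.pyGetD state_names ci "",
                   PySem.List.pyGetD state_names ni "") ∈ F then adj
          else
            PySem.Dict.modify
              (PySem.Dict.modify adj ci PySem.Set.empty (fun s => PySem.Set.add s ni))
              ni PySem.Set.empty (fun s => PySem.Set.add s ci)) adj) adj) x PySem.Set.empty ↔
      (y ∈ PySem.Dict.getD adj x PySem.Set.empty ∨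
        ∃ ci ∈ cs, ∃ ni ∈ ys, ci ≠ ni ∧
          (proposer, pvNm state_names ci, pvNm state_names ni) ∉ F ∧
          ((x = ci ∧ y = ni) ∨ (x = ni ∧ y = ci))) := by
  intro cs
  induction cs with
  | nil => intro adj x y; simp
  | cons c cs ih =>
    intro adj x y
    simp only [List.foldl_cons]
    rw [ih, pvAdjInner state_names F proposer c ys _ x y]
    simp only [List.mem_cons, exists_eq_or_imp]
    exact or_assoc

lemma pvAdjPlayers (state_names : List String) (F : List (String × String × String))
    (S : List Int) :
    ∀ (ps : List String) (adj : PySem.Dict Int (PySem.Set Int)) (x y : Int),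
      y ∈ PySem.Dict.getD (ps.foldl (fun adj proposer => S.foldl (fun adj ci =>
          S.foldl (fun adj ni =>
            if ci = ni then adj
            else if (proposer, PySem.List.pyGetD state_names ci "",
                     PySem.List.pyGetD state_names ni "") ∈ F then adj
            else
              PySem.Dict.modify
                (PySem.Dict.modify adj ci PySem.Set.empty (fun s => PySem.Set.add s ni))
                ni PySem.Set.empty (fun s => PySem.Set.add s ci)) adj) adj) adj)
          x PySem.Set.empty ↔
      (y ∈ PySem.Dict.getD adj x PySem.Set.empty ∨
        ∃ p ∈ ps, ∃ ci ∈ S, ∃ ni ∈ S, ci ≠ ni ∧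
          (p, pvNm state_names ci, pvNm state_names ni) ∉ F ∧
          ((x = ci ∧ y = ni) ∨ (x = ni ∧ y = ci))) := by
  intro ps
  induction ps with
  | nil => intro adj x y; simp
  | cons p ps ih =>
    intro adj x y
    simp only [List.foldl_cons]
    rw [ih, pvAdjMid state_names F p S S _ x y]
    simp only [List.mem_cons, exists_eq_or_imp]
    exact or_assoc

lemma pvAdjChar (state_names players : List String) (F : List (String × String × String))
    (L : List Int) (x y : Int) :
    y ∈ PySem.Dict.getD
        ((PySem.List.pyRange 0 (PySem.List.len players) 1).foldl (fun adj pi =>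
          L.foldl (fun adj ci => L.foldl (fun adj ni =>
            if ci = ni then adj
            else if (PySem.List.pyGetD players pi "", PySem.List.pyGetD state_names ci "",
                     PySem.List.pyGetD state_names ni "") ∈ F then adj
            else
              PySem.Dict.modify
                (PySem.Dict.modify adj ci PySem.Set.empty (fun s => PySem.Set.add s ni))
                ni PySem.Set.empty (fun s => PySem.Set.add s ci)) adj) adj)
          (L.foldl (fun d i => d.insert i PySem.Set.empty) PySem.Dict.empty))
        x PySem.Set.empty ↔
      pvE state_names players F L x y := by
  have hr := PySem.List.foldl_pyRange_zero_pyGetD players ""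
    (fun adj proposer => L.foldl (fun adj ci => L.foldl (fun adj ni =>
        if ci = ni then adj
        else if (proposer, PySem.List.pyGetD state_names ci "",
                 PySem.List.pyGetD state_names ni "") ∈ F then adj
        else
          PySem.Dict.modify
            (PySem.Dict.modify adj ci PySem.Set.empty (fun s => PySem.Set.add s ni))
            ni PySem.Set.empty (fun s => PySem.Set.add s ci)) adj) adj)
    (L.foldl (fun d i => d.insert i PySem.Set.empty) PySem.Dict.empty)
  rw [hr, pvAdjPlayers state_names F L players _ x y, pvAdj0_getD]
  constructor
  · rintro (h | ⟨p, hp, ci, hci, ni, hni, hne, hf, ⟨rfl, rfl⟩ | ⟨rfl, rfl⟩⟩)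
    · cases h
    · exact ⟨hci, hni, hne, p, hp, Or.inl hf⟩
    · exact ⟨hni, hci, fun h => hne h.symm, p, hp, Or.inr hf⟩
  · rintro ⟨hx, hy, hne, p, hp, hd | hd⟩
    · exact Or.inr ⟨p, hp, x, hx, y, hy, hne, hd, Or.inl ⟨rfl, rfl⟩⟩
    · exact Or.inr ⟨p, hp, y, hy, x, hx, fun h => hne h.symm, hd, Or.inr ⟨rfl, rfl⟩⟩

-- ---------- B: the forbidding-player counts characterise pvE ----------

lemma pvCountPDisjoint (l : List String) (a : String) (ps : List String) (ha : a ∉ ps) :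
    l.countP (fun x => decide (x ∈ a :: ps))
      = l.count a + l.countP (fun x => decide (x ∈ ps)) := by
  induction l with
  | nil => simp
  | cons x l ih =>
    simp only [List.countP_cons, List.count_cons, ih]
    by_cases hxa : x = a
    · subst hxa
      have : x ∉ ps := ha
      simp [this]
      omega
    · by_cases hxp : x ∈ ps <;> simp [hxa, hxp] <;> omega

lemma pvSumCount (players : List String) (ps : List String) (hnd : ps.Nodup) :
    ((ps.map (fun p => ((players.count p : Nat) : Int))).sum)
      = ((players.countP (fun x => decide (x ∈ ps)) : Nat) : Int) := by
  induction ps with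
  | nil => simp
  | cons a ps ih =>
    have ha : a ∉ ps := by simp_all
    have hnd' : ps.Nodup := hnd.of_cons
    simp only [List.map_cons, List.sum_cons, ih hnd', pvCountPDisjoint players a ps ha]
    push_cast
    ring

lemma pvForbCount (players : List String) (F : List (String × String × String))
    (hF : F.Nodup) (a b : String) :
    PySem.Dict.getD
      (F.foldl (fun d t => PySem.Dict.modify d (t.2.1, t.2.2) 0
        (· + PySem.Dict.getD (PySem.Dict.counter players) t.1 0)) PySem.Dict.empty)
      (a, b) 0
    = ((players.countP (fun p => decide ((p, a, b) ∈ F)) : Nat) : Int) := by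
  have stage1 : ∀ (G : List (String × String × String)) (d : PySem.Dict (String × String) Int),
      PySem.Dict.getD (G.foldl (fun d t => PySem.Dict.modify d (t.2.1, t.2.2) 0
        (· + PySem.Dict.getD (PySem.Dict.counter players) t.1 0)) d) (a, b) 0
      = PySem.Dict.getD d (a, b) 0 +
        ((G.filter (fun t => decide (t.2.1 = a ∧ t.2.2 = b))).map
          (fun t => ((players.count t.1 : Nat) : Int))).sum := by
    intro G
    induction G with
    | nil => intro d; simp
    | cons t G ihG =>
      intro d
      simp only [List.foldl_cons, List.filter_cons]
      rw [ihG, PySem.Dict.getD_modify]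
      by_cases hm : t.2.1 = a ∧ t.2.2 = b
      · rw [if_pos (by rw [hm.1, hm.2]), if_pos (by simp [hm.1, hm.2])]
        simp only [List.map_cons, List.sum_cons, PySem.Dict.getD_counter]
        rw [hm.1, hm.2]
        ring
      · have hk : ¬ (((a : String), (b : String)) = (t.2.1, t.2.2)) := by
          intro hk
          apply hm
          rw [Prod.mk.injEq] at hk
          exact ⟨hk.1.symm, hk.2.symm⟩
        rw [if_neg hk, if_neg (by simp [hm])]
  rw [stage1 F PySem.Dict.empty]
  have hempty : PySem.Dict.getD (PySem.Dict.empty : PySem.Dict (String × String) Int) (a, b) 0 = 0 := rfl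
  rw [hempty, zero_add]
  have hmm2 : (List.map (fun t => ((players.count t.1 : Nat) : Int))
      (F.filter (fun t => decide (t.2.1 = a ∧ t.2.2 = b))))
      = List.map (fun p => ((players.count p : Nat) : Int))
        ((F.filter (fun t => decide (t.2.1 = a ∧ t.2.2 = b))).map (fun t => t.1)) := by
    rw [List.map_map]
    rfl
  rw [hmm2]
  have hnd : ((F.filter (fun t => decide (t.2.1 = a ∧ t.2.2 = b))).map
      (fun t => t.1)).Nodup := by
    apply List.Nodup.map_on _ (hF.filter _)
    rintro ⟨p1, a1, b1⟩ ht ⟨p2, a2, b2⟩ hu heq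
    have ht' := List.of_mem_filter ht
    have hu' := List.of_mem_filter hu
    simp only [decide_eq_true_eq] at ht' hu'
    simp only at heq
    simp [heq, ht'.1, ht'.2, hu'.1, hu'.2]
  have hiff : ∀ p, p ∈ ((F.filter (fun t => decide (t.2.1 = a ∧ t.2.2 = b))).map
      (fun t => t.1)) ↔ (p, a, b) ∈ F := by
    intro p
    constructor
    · intro hp
      obtain ⟨⟨p1, a1, b1⟩, ht, heq⟩ := List.mem_map.mp hp
      have hm := List.mem_of_mem_filter ht
      have hc := List.of_mem_filter ht
      simp only [decide_eq_true_eq] at hc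
      simp only at heq
      rw [← heq, ← hc.1, ← hc.2]
      exact hm
    · intro hp
      exact List.mem_map.mpr ⟨(p, a, b), List.mem_filter.mpr ⟨hp, by simp⟩, rfl⟩
  rw [pvSumCount players _ hnd]
  congr 1
  apply List.countP_congr
  intro x _
  simp only [decide_eq_true_eq]
  exact hiff x

lemma pvCountPLtIff (l : List String) (P : String → Bool) :
    l.countP P < l.length ↔ ∃ p ∈ l, ¬ P p = true := by
  constructor
  · intro h
    by_contra hc
    push_neg at hc
    have := List.countP_eq_length.mpr (fun a ha => by simpa using hc a ha)
    omega
  · intro ⟨p, hp, hP⟩ 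
    have hle : l.countP P ≤ l.length := List.countP_le_length
    rcases Nat.lt_or_ge (l.countP P) l.length with h | h
    · exact h
    · exfalso
      have heq : l.countP P = l.length := le_antisymm hle h
      exact hP (List.countP_eq_length.mp heq p hp)

lemma pvPermittedChar (state_names players : List String)
    (F : List (String × String × String)) (hF : F.Nodup) (x y : Int) :
    ((decide (PySem.Dict.getD
        (F.foldl (fun d t => PySem.Dict.modify d (t.2.1, t.2.2) 0
          (· + PySem.Dict.getD (PySem.Dict.counter players) t.1 0)) PySem.Dict.empty)
        (PySem.List.pyGetD state_names x "", PySem.List.pyGetD state_names y "") 0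
        < PySem.List.len players) ||
      decide (PySem.Dict.getD
        (F.foldl (fun d t => PySem.Dict.modify d (t.2.1, t.2.2) 0
          (· + PySem.Dict.getD (PySem.Dict.counter players) t.1 0)) PySem.Dict.empty)
        (PySem.List.pyGetD state_names y "", PySem.List.pyGetD state_names x "") 0
        < PySem.List.len players)) = true) ↔
    ∃ p ∈ players,
      (p, pvNm state_names x, pvNm state_names y) ∉ F ∨
      (p, pvNm state_names y, pvNm state_names x) ∉ F := by
  simp only [pvNm]
  rw [pvForbCount players F hF, pvForbCount players F hF]
  simp only [PySem.List.len_eq, Bool.or_eq_true, decide_eq_true_eq, Nat.cast_lt]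
  rw [pvCountPLtIff, pvCountPLtIff]
  simp only [decide_eq_true_eq]
  constructor
  · rintro (⟨p, hp, h⟩ | ⟨p, hp, h⟩)
    · exact ⟨p, hp, Or.inl h⟩
    · exact ⟨p, hp, Or.inr h⟩
  · rintro ⟨p, hp, h | h⟩
    · exact Or.inl ⟨p, hp, h⟩
    · exact Or.inr ⟨p, hp, h⟩

-- ---------- BFS collects the connected class ----------

lemma pvBfsA_inv (adj : PySem.Dict Int (PySem.Set Int)) (pool : List Int)
    (E : Int → Int → Prop)
    (hadj : ∀ x y, y ∈ PySem.Dict.getD adj x PySem.Set.empty ↔ E x y)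
    (hpool : ∀ x y, E x y → x ∈ pool ∧ y ∈ pool)
    (start : Int) (V0 : PySem.Set Int) :
    ∀ (queue : List Int) (visited comp : PySem.Set Int),
      comp.Nodup →
      (∀ x, x ∈ comp ↔ x ∈ visited ∧ x ∉ V0) →
      (∀ x ∈ V0, x ∈ visited) →
      (∀ q ∈ queue, Relation.ReflTransGen E start q ∧ q ∈ pool) →
      (∀ v ∈ comp, Relation.ReflTransGen E start v) →
      (∀ v ∈ comp, ∀ y, E v y → y ∈ visited ∨ y ∈ queue) →
      (start ∈ visited ∨ start ∈ queue) →
      ((pvBfsA adj pool queue visited comp).2.Nodup ∧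
       (∀ x, x ∈ (pvBfsA adj pool queue visited comp).2 ↔
          x ∈ (pvBfsA adj pool queue visited comp).1 ∧ x ∉ V0) ∧
       (∀ x ∈ visited, x ∈ (pvBfsA adj pool queue visited comp).1) ∧
       (∀ v ∈ (pvBfsA adj pool queue visited comp).2, Relation.ReflTransGen E start v) ∧
       (∀ v ∈ (pvBfsA adj pool queue visited comp).2, ∀ y, E v y →
          y ∈ (pvBfsA adj pool queue visited comp).1) ∧
       start ∈ (pvBfsA adj pool queue visited comp).1) := by
  intro queue visited comp
  induction queue, visited, comp using pvBfsA.induct adj pool with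
  | case1 visited comp =>
    intro hnd hcv _hV0 _hq hconn hcl hst
    simp only [pvBfsA]
    refine ⟨hnd, hcv, fun x hx => hx, hconn, fun v hv y hEy => ?_, ?_⟩
    · rcases hcl v hv y hEy with h | h
      · exact h
      · cases h
    · rcases hst with h | h
      · exact h
      · cases h
  | case2 node rest visited comp hcont ih =>
    intro hnd hcv hV0 hq hconn hcl hst
    simp only [pvBfsA, if_pos hcont]
    refine ih hnd hcv hV0 (fun q hq' => hq q (List.mem_cons_of_mem _ hq')) hconn
      (fun v hv y hEy => ?_) ?_
    · rcases hcl v hv y hEy with h | h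
      · exact Or.inl h
      · rcases List.mem_cons.mp h with rfl | h'
        · exact Or.inl ((PySem.Set.contains_iff _ _).mp hcont)
        · exact Or.inr h'
    · rcases hst with h | h
      · exact Or.inl h
      · rcases List.mem_cons.mp h with rfl | h'
        · exact Or.inl ((PySem.Set.contains_iff _ _).mp hcont)
        · exact Or.inr h'
  | case3 node rest visited comp hcont visited' component' hpl ih =>
    intro hnd hcv hV0 hq hconn hcl hst
    have hnodeV : node ∉ visited := fun hm => hcont ((PySem.Set.contains_iff _ _).mpr hm)
    have hnode := hq node (List.mem_cons_self ..)
    have hnV0 : node ∉ V0 := fun hm => hnodeV (hV0 node hm)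
    have ihr := ih (PySem.Set.nodup_add _ _ hnd)
      (fun x => by
        rw [PySem.Set.mem_add, PySem.Set.mem_add]
        constructor
        · rintro (hx | rfl)
          · exact ⟨Or.inl ((hcv x).mp hx).1, ((hcv x).mp hx).2⟩
          · exact ⟨Or.inr rfl, hnV0⟩
        · rintro ⟨hx | rfl, hxV0⟩
          · exact Or.inl ((hcv x).mpr ⟨hx, hxV0⟩)
          · exact Or.inr rfl)
      (fun x hx => (PySem.Set.mem_add _ _ _).mpr (Or.inl (hV0 x hx)))
      (fun q hq' => by
        rcases List.mem_append.mp hq' with h | h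
        · exact hq q (List.mem_cons_of_mem _ h)
        · have hmem := List.mem_of_mem_filter h
          have hE := (hadj node q).mp hmem
          exact ⟨hnode.1.tail hE, (hpool node q hE).2⟩)
      (fun v hv => by
        rcases (PySem.Set.mem_add _ _ _).mp hv with h | rfl
        · exact hconn v h
        · exact hnode.1)
      (fun v hv y hEy => by
        rcases (PySem.Set.mem_add _ _ _).mp hv with h | rfl
        · rcases hcl v h y hEy with h' | h'
          · exact Or.inl ((PySem.Set.mem_add _ _ _).mpr (Or.inl h'))
          · rcases List.mem_cons.mp h' with rfl | h''
            · exact Or.inl ((PySem.Set.mem_add _ _ _).mpr (Or.inr rfl))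
            · exact Or.inr (List.mem_append.mpr (Or.inl h''))
        · have hy : y ∈ PySem.Dict.getD adj v PySem.Set.empty := (hadj v y).mpr hEy
          by_cases hyv : y ∈ PySem.Set.add visited v
          · exact Or.inl hyv
          · refine Or.inr (List.mem_append.mpr (Or.inr (List.mem_filter.mpr ⟨hy, ?_⟩)))
            simp only [Bool.not_eq_true']
            exact (Bool.not_eq_true _).mp
              (fun hc => hyv ((PySem.Set.contains_iff _ _).mp hc)))
      (by
        rcases hst with h | h
        · exact Or.inl ((PySem.Set.mem_add _ _ _).mpr (Or.inl h))
        · rcases List.mem_cons.mp h with rfl | h'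
          · exact Or.inl ((PySem.Set.mem_add _ _ _).mpr (Or.inr rfl))
          · exact Or.inr (List.mem_append.mpr (Or.inl h')))
    obtain ⟨i1, i2, i3, i4, i5, i6⟩ := ihr
    simp only [pvBfsA, if_neg hcont, dif_pos hpl]
    exact ⟨i1, i2, fun x hx => i3 x ((PySem.Set.mem_add _ _ _).mpr (Or.inl hx)), i4, i5, i6⟩
  | case4 node rest visited comp hcont visited' component' hpl ih =>
    intro _hnd _hcv _hV0 hq _hconn _hcl _hst
    exact absurd (hq node (List.mem_cons_self ..)).2 hpl

lemma pvBfsA_class (adj : PySem.Dict Int (PySem.Set Int)) (pool : List Int)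
    (E : Int → Int → Prop)
    (hadj : ∀ x y, y ∈ PySem.Dict.getD adj x PySem.Set.empty ↔ E x y)
    (hsym : ∀ x y, E x y → E y x)
    (hpool : ∀ x y, E x y → x ∈ pool ∧ y ∈ pool)
    (start : Int) (V0 : PySem.Set Int)
    (hclosed : ∀ v ∈ V0, ∀ y, E v y → y ∈ V0)
    (hs0 : start ∉ V0) (hsp : start ∈ pool) :
    (pvBfsA adj pool [start] V0 PySem.Set.empty).2.Nodup ∧
    (∀ x, x ∈ (pvBfsA adj pool [start] V0 PySem.Set.empty).2 ↔ Relation.ReflTransGen E start x) ∧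
    (∀ x, x ∈ (pvBfsA adj pool [start] V0 PySem.Set.empty).1 ↔
      x ∈ V0 ∨ x ∈ (pvBfsA adj pool [start] V0 PySem.Set.empty).2) := by
  obtain ⟨c1, c2, c3, c4, c5, c6⟩ :=
    pvBfsA_inv adj pool E hadj hpool start V0 [start] V0 PySem.Set.empty
      (by constructor)
      (fun x => ⟨fun hx => absurd hx (List.not_mem_nil), fun ⟨h1, h2⟩ => absurd h1 h2⟩)
      (fun x hx => hx)
      (fun q hq => by
        rcases List.mem_cons.mp hq with rfl | h
        · exact ⟨Relation.ReflTransGen.refl, hsp⟩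
        · cases h)
      (fun v hv => absurd hv (List.not_mem_nil))
      (fun v hv => absurd hv (List.not_mem_nil))
      (Or.inr (List.mem_cons_self ..))
  refine ⟨c1, fun x => ⟨c4 x, fun hconn => ?_⟩, fun x => ⟨fun hx => ?_, fun hx => ?_⟩⟩
  · induction hconn with
    | refl => exact (c2 start).mpr ⟨c6, hs0⟩
    | tail _hab hbc ihb =>
      rename_i b c
      have hcr1 : c ∈ (pvBfsA adj pool [start] V0 PySem.Set.empty).1 := c5 b ihb c hbc
      have hcV0 : c ∉ V0 := fun hcV => by
        have hbV0 : b ∈ V0 := hclosed c hcV b (hsym b c hbc)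
        exact ((c2 b).mp ihb).2 hbV0
      exact (c2 c).mpr ⟨hcr1, hcV0⟩
  · by_cases hV : x ∈ V0
    · exact Or.inl hV
    · exact Or.inr ((c2 x).mpr ⟨hx, hV⟩)
  · rcases hx with h | h
    · exact c3 x h
    · exact ((c2 x).mp h).1

-- ---------- the stack scan collects the connected class ----------

lemma pvScanB_mono (permitted : Int → Int → Bool) (i : Int) :
    ∀ (l : List Int) (acc : PySem.Set Int × List Int) (x : Int), x ∈ acc.1 →
      x ∈ (l.foldl (fun acc j =>
        if !(PySem.Set.contains acc.1 j) && permitted i j then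
          (PySem.Set.add acc.1 j, acc.2 ++ [j])
        else acc) acc).1 := by
  intro l
  induction l with
  | nil => intro acc x hx; exact hx
  | cons a t ih =>
    intro acc x hx
    simp only [List.foldl_cons]
    by_cases hc : (!(PySem.Set.contains acc.1 a) && permitted i a) = true
    · rw [if_pos hc]
      exact ih _ x ((PySem.Set.mem_add _ _ _).mpr (Or.inl hx))
    · rw [if_neg hc]
      exact ih _ x hx

lemma pvScanB_complete_aux (permitted : Int → Int → Bool) (i : Int) :
    ∀ (l : List Int) (acc : PySem.Set Int × List Int) (j : Int), j ∈ l →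
      permitted i j = true →
      j ∈ (l.foldl (fun acc j =>
        if !(PySem.Set.contains acc.1 j) && permitted i j then
          (PySem.Set.add acc.1 j, acc.2 ++ [j])
        else acc) acc).1 := by
  intro l
  induction l with
  | nil => intro acc j hj; cases hj
  | cons a t ih =>
    intro acc j hj hperm
    simp only [List.foldl_cons]
    rcases List.mem_cons.mp hj with heq | hj'
    · subst heq
      by_cases hc : (!(PySem.Set.contains acc.1 j) && permitted i j) = true
      · rw [if_pos hc]
        exact pvScanB_mono permitted i t _ j ((PySem.Set.mem_add _ _ _).mpr (Or.inr rfl))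
      · rw [if_neg hc]
        have hmem : j ∈ acc.1 := by
          simp only [hperm, Bool.and_true, Bool.not_eq_true', Bool.not_eq_false] at hc
          exact (PySem.Set.contains_iff _ _).mp hc
        exact pvScanB_mono permitted i t _ j hmem
    · by_cases hc : (!(PySem.Set.contains acc.1 a) && permitted i a) = true
      · rw [if_pos hc]; exact ih _ j hj' hperm
      · rw [if_neg hc]; exact ih _ j hj' hperm

lemma pvScanB_complete (permitted : Int → Int → Bool) (idxs : List Int) (i : Int)
    (comp : PySem.Set Int) :
    ∀ j ∈ idxs, permitted i j = true → j ∈ (pvScanB permitted idxs i comp).1 :=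
  fun j hj hp => pvScanB_complete_aux permitted i idxs (comp, []) j hj hp

lemma pvScanB_nodup (permitted : Int → Int → Bool) (idxs : List Int) (i : Int)
    (comp : PySem.Set Int) (h : comp.Nodup) : (pvScanB permitted idxs i comp).1.Nodup := by
  suffices haux : ∀ (l : List Int) (acc : PySem.Set Int × List Int), acc.1.Nodup →
      (l.foldl (fun acc j =>
        if !(PySem.Set.contains acc.1 j) && permitted i j then
          (PySem.Set.add acc.1 j, acc.2 ++ [j])
        else acc) acc).1.Nodup by
    exact haux idxs (comp, []) h
  intro l
  induction l with
  | nil => intro acc hacc; exact hacc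
  | cons a t ih =>
    intro acc hacc
    simp only [List.foldl_cons]
    by_cases hc : (!(PySem.Set.contains acc.1 a) && permitted i a) = true
    · rw [if_pos hc]
      exact ih _ (PySem.Set.nodup_add _ _ hacc)
    · rw [if_neg hc]
      exact ih _ hacc

lemma pvDfsB_inv (permitted : Int → Int → Bool) (idxs : List Int)
    (E : Int → Int → Prop)
    (hE : ∀ x y, E x y ↔ (x ∈ idxs ∧ y ∈ idxs ∧ x ≠ y ∧ permitted x y = true))
    (start : Int) :
    ∀ (stack : List Int) (comp : PySem.Set Int),
      comp.Nodup →
      (∀ x ∈ stack, x ∈ comp) →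
      (∀ v ∈ comp, Relation.ReflTransGen E start v) →
      (∀ v ∈ comp, v ∈ idxs) →
      (∀ v ∈ comp, v ∉ stack → ∀ y, E v y → y ∈ comp) →
      start ∈ comp →
      ((pvDfsB permitted idxs stack comp).Nodup ∧
       (∀ v ∈ pvDfsB permitted idxs stack comp, Relation.ReflTransGen E start v) ∧
       (∀ v ∈ pvDfsB permitted idxs stack comp, ∀ y, E v y →
          y ∈ pvDfsB permitted idxs stack comp) ∧
       start ∈ pvDfsB permitted idxs stack comp) := by
  intro stack comp
  induction stack, comp using pvDfsB.induct permitted idxs with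
  | case1 comp =>
    intro hnd _hstk hconn _hidx hcl hst
    simp only [pvDfsB]
    exact ⟨hnd, hconn, fun v hv y hEy => hcl v hv (List.not_mem_nil) y hEy, hst⟩
  | case2 i stack comp r ih =>
    intro hnd hstk hconn hidx hcl hst
    have hi : i ∈ comp := hstk i (List.mem_cons_self ..)
    have hfst := pvScanB_fst permitted idxs i comp
    have hnew := pvScanB_new permitted idxs i comp
    refine ?_
    have ihr := ih (pvScanB_nodup permitted idxs i comp hnd)
      (fun x hx => by
        rcases List.mem_append.mp hx with h | h
        · rw [hfst]
          exact List.mem_append.mpr (Or.inr (List.mem_reverse.mp h))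
        · rw [hfst]
          exact List.mem_append.mpr (Or.inl (hstk x (List.mem_cons_of_mem _ h))))
      (fun v hv => by
        rw [hfst] at hv
        rcases List.mem_append.mp hv with h | h
        · exact hconn v h
        · obtain ⟨hvi, hvc, hvp⟩ := hnew v h
          exact (hconn i hi).tail ((hE i v).mpr
            ⟨hidx i hi, hvi, fun he => hvc (he ▸ hi), hvp⟩))
      (fun v hv => by
        rw [hfst] at hv
        rcases List.mem_append.mp hv with h | h
        · exact hidx v h
        · exact (hnew v h).1)
      (fun v hv hvs y hEy => by
        rw [hfst] at hv
        rcases List.mem_append.mp hv with hvc | hvn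
        · have hvstack : v ∉ stack := fun hm =>
            hvs (List.mem_append.mpr (Or.inr hm))
          by_cases hvi : v = i
          · subst hvi
            obtain ⟨hy1, hy2, _hy3, hy4⟩ := (hE v y).mp hEy
            exact pvScanB_complete permitted idxs v comp y hy2 hy4
          · have := hcl v hvc (fun hm => by
              rcases List.mem_cons.mp hm with h | h
              · exact hvi h
              · exact hvstack h) y hEy
            rw [hfst]
            exact List.mem_append.mpr (Or.inl this)
        · exact absurd (List.mem_append.mpr
            (Or.inl (List.mem_reverse.mpr hvn))) hvs)
      (by rw [hfst]; exact List.mem_append.mpr (Or.inl hst))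
    simpa only [pvDfsB] using ihr

lemma pvDfsB_class (permitted : Int → Int → Bool) (idxs : List Int)
    (E : Int → Int → Prop)
    (hE : ∀ x y, E x y ↔ (x ∈ idxs ∧ y ∈ idxs ∧ x ≠ y ∧ permitted x y = true))
    (start : Int) (hs : start ∈ idxs) :
    (pvDfsB permitted idxs [start] (PySem.Set.add PySem.Set.empty start)).Nodup ∧
    (∀ x, x ∈ pvDfsB permitted idxs [start] (PySem.Set.add PySem.Set.empty start) ↔
      Relation.ReflTransGen E start x) := by
  have hcomp0 : ∀ x, x ∈ PySem.Set.add PySem.Set.empty start ↔ x = start := by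
    intro x
    rw [PySem.Set.mem_add]
    exact ⟨fun h => h.resolve_left (fun h' => absurd h' (List.not_mem_nil)),
           fun h => Or.inr h⟩
  obtain ⟨c1, c2, c3, c4⟩ :=
    pvDfsB_inv permitted idxs E hE start [start] (PySem.Set.add PySem.Set.empty start)
      (by
        have he : PySem.Set.add PySem.Set.empty start = [start] := rfl
        rw [he]
        exact List.nodup_cons.mpr ⟨List.not_mem_nil, List.nodup_nil⟩)
      (fun x hx => by
        rcases List.mem_cons.mp hx with rfl | h
        · exact (hcomp0 x).mpr rfl
        · cases h)
      (fun v hv => by rw [(hcomp0 v).mp hv])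
      (fun v hv => by rw [(hcomp0 v).mp hv]; exact hs)
      (fun v hv hvs => absurd (by rw [(hcomp0 v).mp hv]; exact List.mem_cons_self ..) hvs)
      ((hcomp0 start).mpr rfl)
  refine ⟨c1, fun x => ⟨c2 x, fun hconn => ?_⟩⟩
  induction hconn with
  | refl => exact c4
  | tail _hab hbc ihb =>
    rename_i b c
    exact c3 b ihb c hbc

-- ---------- the two outer loops agree ----------

lemma pvOuter_eq (state_names : List String) (adj : PySem.Dict Int (PySem.Set Int))
    (pool : List Int) (permitted : Int → Int → Bool) (idxs : List Int)
    (E : Int → Int → Prop)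
    (hadj : ∀ x y, y ∈ PySem.Dict.getD adj x PySem.Set.empty ↔ E x y)
    (hsym : ∀ x y, E x y → E y x)
    (hpool : ∀ x y, E x y → x ∈ pool ∧ y ∈ pool)
    (hE : ∀ x y, E x y ↔ (x ∈ idxs ∧ y ∈ idxs ∧ x ≠ y ∧ permitted x y = true)) :
    ∀ (rest : List Int) (visited assigned : PySem.Set Int) (components : List (List String)),
      (∀ x, x ∈ visited ↔ x ∈ assigned) →
      (∀ v ∈ visited, ∀ y, E v y → y ∈ visited) →
      (∀ x ∈ rest, x ∈ pool ∧ x ∈ idxs) →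
      pvOuterA state_names adj pool rest visited components
        = pvOuterB state_names permitted idxs rest assigned components := by
  intro rest
  induction rest with
  | nil => intro visited assigned components _ _ _; rfl
  | cons start rest ih =>
    intro visited assigned components hva hcl hsub
    have hceq : PySem.Set.contains visited start = PySem.Set.contains assigned start := by
      rw [Bool.eq_iff_iff]
      simp only [PySem.Set.contains_iff]
      exact hva start
    simp only [pvOuterA, pvOuterB]
    by_cases hc : PySem.Set.contains assigned start = true
    · rw [if_pos (hceq.trans hc), if_pos hc]
      exact ih visited assigned components hva hcl
        (fun x hx => hsub x (List.mem_cons_of_mem _ hx))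
    · rw [if_neg (fun h => hc (hceq.symm.trans h)), if_neg hc]
      have hstartnv : start ∉ visited := fun hm =>
        hc (hceq ▸ (PySem.Set.contains_iff _ _).mpr hm)
      obtain ⟨b1, b2, b3⟩ := pvBfsA_class adj pool E hadj hsym hpool start visited hcl
        hstartnv (hsub start (List.mem_cons_self ..)).1
      obtain ⟨d1, d2⟩ := pvDfsB_class permitted idxs E hE start
        (hsub start (List.mem_cons_self ..)).2
      have hmem : ∀ x, x ∈ (pvBfsA adj pool [start] visited PySem.Set.empty).2 ↔
          x ∈ pvDfsB permitted idxs [start] (PySem.Set.add PySem.Set.empty start) :=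
        fun x => (b2 x).trans (d2 x).symm
      have hperm := (List.perm_ext_iff_of_nodup b1 d1).mpr hmem
      have hsorted : PySem.List.sorted (pvBfsA adj pool [start] visited PySem.Set.empty).2
            (fun x => x)
          = PySem.List.sorted (pvDfsB permitted idxs [start]
            (PySem.Set.add PySem.Set.empty start)) (fun x => x) :=
        PySem.List.sorted_eq_sorted_of_perm _ _ _ (fun _ _ h => h) hperm
      rw [hsorted]
      refine ih _ _ _ (fun x => ?_) (fun v hv y hEy => ?_)
        (fun x hx => hsub x (List.mem_cons_of_mem _ hx))
      · rw [b3 x, PySem.Set.mem_update]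
        constructor
        · rintro (h | h)
          · exact Or.inl ((hva x).mp h)
          · exact Or.inr ((hmem x).mp h)
        · rintro (h | h)
          · exact Or.inl ((hva x).mpr h)
          · exact Or.inr ((hmem x).mpr h)
      · rcases (b3 v).mp hv with hvV | hvC
        · exact (b3 y).mpr (Or.inl (hcl v hvV y hEy))
        · exact (b3 y).mpr (Or.inr ((b2 y).mpr (((b2 v).mp hvC).tail hEy)))


-- ===== VERDICT (by name: the statement is the Claim_ definition above) =====
theorem find_lcs_connected_components_py_spec : Claim_equal_find_lcs_connected_components_py := by
  intro lcs_states state_names players committee_idxs forbidden_proposals _hdom hpre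
  obtain ⟨hfound, hlnd, hFnd⟩ := hpre
  unfold Spec_find_lcs_connected_components_py
  unfold find_lcs_connected_components_py find_lcs_connected_components_py_alt
  dsimp only
  have hL : List.map (fun s => (((PySem.List.index? state_names s).getD 0 : Nat) : Int)) lcs_states
      = pvIdxs lcs_states state_names := rfl
  rw [hL, PySem.Set.ofList_eq_self_of_nodup _ (pvIdxs_nodup lcs_states state_names hfound hlnd)]
  exact (pvOuter_eq state_names _ _ _ _
    (pvE state_names players (forbidden_proposals.getD []) (pvIdxs lcs_states state_names))
    (fun x y => pvAdjChar state_names players (forbidden_proposals.getD [])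
      (pvIdxs lcs_states state_names) x y)
    (fun x y => pvE_symm)
    (fun x y h => ⟨h.1, h.2.1⟩)
    (fun x y => by
      constructor
      · intro h
        exact ⟨by simpa [PySem.List.mem_sorted] using h.1,
               by simpa [PySem.List.mem_sorted] using h.2.1, h.2.2.1,
               (pvPermittedChar state_names players _ hFnd x y).mpr h.2.2.2⟩
      · intro ⟨h1, h2, h3, h4⟩
        exact ⟨by simpa [PySem.List.mem_sorted] using h1,
               by simpa [PySem.List.mem_sorted] using h2, h3,
               (pvPermittedChar state_names players _ hFnd x y).mp h4⟩)
    _ PySem.Set.empty PySem.Set.empty []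
    (fun x => Iff.rfl)
    (fun v hv => absurd hv (List.not_mem_nil))
    (fun x hx => ⟨by simpa [PySem.List.mem_sorted] using hx,
                  hx⟩))
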